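-- pv_equiv track=rewrite | github.com/tmu-nlp/UniTP | data/ner_types.py | delete_o
-- ===== SOURCE A (Python) =====
-- def delete_o(old_ner, old_fence, n_indices):
--     deletion = 0
--     new_ner, new_fence = [], [0]
--     assert all(x < y for x, y in zip(n_indices, n_indices[1:]))
--     for ner, start, end in zip(old_ner, old_fence, old_fence[1:]):
--         offset = 0
--         deleted = None
--         while (has_idx := deletion < len(n_indices)) and (next_ptr := n_indices[deletion]) == start + offset and next_ptr < end:
--             offset += 1
--             deleted = next_ptr
--             deletion += 1
--         if deleted is not None and deleted == end - 1: # deleted whole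
--             continue
--         elif has_idx and next_ptr < end: # rhs
--             while next_ptr < end: # discontinuous chunks
--                 if new_fence[-1] < next_ptr - deletion:
--                     new_ner.append(ner)
--                     new_fence.append(next_ptr - deletion)
--                 deletion += 1
--                 if deletion >= len(n_indices):
--                     break # else cannot catch this
--                 next_ptr = n_indices[deletion]
--             if next_ptr < end - 1: # remaining
--                 new_ner.append(ner)
--                 new_fence.append(end - deletion)
--         else: # no next_ptr < end, no delete
--             new_ner.append(ner)
--             new_fence.append(end - deletion)
--     return new_ner, new_fence
-- ===== SOURCE B (Python) =====
-- def _rank(n_indices, t):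
--     # number of deletion indices strictly below t (bisect_left on the sorted list)
--     return sum(1 for x in n_indices if x < t)
--
-- def delete_o(old_ner, old_fence, n_indices):
--     assert all(x < y for x, y in zip(n_indices, n_indices[1:]))
--     new_ner, new_fence = [], [0]
--     total = len(n_indices)
--     T = None  # highest chunk end whose deletions have been spent (None = none yet)
--     for ner, start, end in zip(old_ner, old_fence, old_fence[1:]):
--         if T is not None and end <= T:
--             # every index below T is already spent; nothing left to delete here
--             new_ner.append(ner)
--             new_fence.append(end - _rank(n_indices, T))
--             continue
--         p = 0 if T is None else _rank(n_indices, T)  # rank of first live index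
--         q = _rank(n_indices, end)                    # live indices < end are n_indices[p:q]
--         k = 0                                        # length of the consecutive run start, start+1, ...
--         while p + k < q and n_indices[p + k] == start + k:
--             k += 1
--         if k > 0 and start + k == end:
--             T = end                                  # whole chunk deleted
--             continue
--         if p + k < q:                                # scattered deletions before end
--             for d in range(p + k, q):
--                 v = n_indices[d] - d
--                 if new_fence[-1] < v:
--                     new_ner.append(ner)
--                     new_fence.append(v)
--             if q == total and n_indices[total - 1] < end - 1:
--                 new_ner.append(ner)
--                 new_fence.append(end - total)
--         else:                                        # no deletions ahead of end
--             new_ner.append(ner)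
--             new_fence.append(end - q)
--         T = end
--     return new_ner, new_fence
-- ===== Notes on version B (the rewrite author's own statement) =====
-- stated objective: alternative
-- what changed: Replaces A's single streaming deletion-pointer machine (nested walrus while-loops threading a mutable index across chunks) by per-chunk rank arithmetic: B keeps only the running maximum chunk end T, recomputes the pointer as the rank (count of deletion indices below a value), brackets each chunk's live deletions by two rank computations, and emits the scattered-deletion fences with a plain for-range over that bracket plus one closed-form trailing test.
import Mathlib
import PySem

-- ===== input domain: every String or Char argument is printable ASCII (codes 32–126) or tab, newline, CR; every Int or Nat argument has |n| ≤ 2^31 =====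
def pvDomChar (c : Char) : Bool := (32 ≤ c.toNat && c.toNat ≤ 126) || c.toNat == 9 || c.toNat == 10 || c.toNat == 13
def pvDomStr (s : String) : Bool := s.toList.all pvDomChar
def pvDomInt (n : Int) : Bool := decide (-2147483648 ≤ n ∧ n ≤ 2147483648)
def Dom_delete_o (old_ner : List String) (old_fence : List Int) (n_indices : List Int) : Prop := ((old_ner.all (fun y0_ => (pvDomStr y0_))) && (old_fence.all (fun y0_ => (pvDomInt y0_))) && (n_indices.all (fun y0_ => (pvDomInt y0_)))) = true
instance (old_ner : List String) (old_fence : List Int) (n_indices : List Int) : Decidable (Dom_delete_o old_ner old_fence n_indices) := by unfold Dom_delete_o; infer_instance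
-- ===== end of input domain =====

-- B re-implements A's streaming deletion-pointer machine by per-chunk rank arithmetic
-- over the sorted deletion list (alternative decomposition, similar cost).

-- ===== PORT A =====
-- the first `while` of A: consumes the consecutive run start, start+1, … while it matches
-- n_indices at the deletion pointer; returns (deletion, deleted).  (The walrus caches
-- has_idx/next_ptr always equal `deletion < len` / `n_indices[deletion]` after the loop,
-- so the caller re-reads them from `deletion`.)
-- (fuel makes the recursion structural; every call passes enough fuel for the loop to finish)
def aFirst (n : List Int) (s e : Int) : Nat → Nat → Int → Option Int → Nat × Option Int
  | 0, deletion, _, deleted => (deletion, deleted)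
  | fuel + 1, deletion, offset, deleted =>
    if h : deletion < n.length then
      let next := n[deletion]
      if next = s + offset ∧ next < e then
        aFirst n s e fuel (deletion + 1) (offset + 1) (some next)
      else (deletion, deleted)
    else (deletion, deleted)

-- the inner `while next_ptr < end` of A (accumulators kept reversed; new_fence[-1] = accF.headD 0)
def aRhs (n : List Int) (e : Int) (ner : String) :
    Nat → Nat → Int → List String → List Int → Nat × Int × List String × List Int
  | 0, deletion, next_ptr, accN, accF => (deletion, next_ptr, accN, accF)
  | fuel + 1, deletion, next_ptr, accN, accF =>
    if next_ptr < e then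
      let push := accF.headD 0 < next_ptr - (deletion : Int)
      let accN' := if push then ner :: accN else accN
      let accF' := if push then (next_ptr - (deletion : Int)) :: accF else accF
      if h : deletion + 1 < n.length then
        aRhs n e ner fuel (deletion + 1) n[deletion + 1] accN' accF'
      else (deletion + 1, next_ptr, accN', accF')   -- break: indices exhausted
    else (deletion, next_ptr, accN, accF)

-- one iteration of A's `for ner, start, end in zip(...)` body
def stepA (n : List Int) (st : Nat × List String × List Int) (c : String × Int × Int) :
    Nat × List String × List Int :=
  let d := st.1; let accN := st.2.1; let accF := st.2.2
  let ner := c.1; let s := c.2.1; let e := c.2.2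
  let r := aFirst n s e (n.length + 1) d 0 none
  let d1 := r.1
  if r.2 = some (e - 1) then (d1, accN, accF)     -- deleted whole: continue
  else if h : d1 < n.length then
    if n[d1] < e then                             -- rhs
      let r2 := aRhs n e ner (n.length + 1) d1 n[d1] accN accF
      if r2.2.1 < e - 1 then (r2.1, ner :: r2.2.2.1, (e - (r2.1 : Int)) :: r2.2.2.2)
      else (r2.1, r2.2.2.1, r2.2.2.2)
    else (d1, ner :: accN, (e - (d1 : Int)) :: accF)
  else (d1, ner :: accN, (e - (d1 : Int)) :: accF)

def delete_o (old_ner : List String) (old_fence : List Int) (n_indices : List Int) :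
    List String × List Int :=
  let st := (old_ner.zip (old_fence.zip old_fence.tail)).foldl (stepA n_indices) (0, [], [0])
  (st.2.1.reverse, st.2.2.reverse)

-- ===== PORT B =====
-- _rank of Source B: number of deletion indices strictly below t
def rankLt (n : List Int) (t : Int) : Nat := n.countP (fun x => decide (x < t))

-- Source B's `while p + k < q and n_indices[p+k] == start + k`
def bRun (n : List Int) (q : Nat) (s : Int) (p : Nat) : Nat → Nat → Nat
  | 0, k => k
  | fuel + 1, k =>
    if p + k < q ∧ n.getD (p + k) 0 = s + (k : Int) then bRun n q s p fuel (k + 1) else k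

-- Source B's `for d in range(p+k, q)` scatter scan
def bScan (n : List Int) (ner : String) (q : Nat) :
    Nat → Nat → List String → List Int → List String × List Int
  | 0, _, accN, accF => (accN, accF)
  | fuel + 1, d, accN, accF =>
    if d < q then
      let v := n.getD d 0 - (d : Int)
      if accF.headD 0 < v then bScan n ner q fuel (d + 1) (ner :: accN) (v :: accF)
      else bScan n ner q fuel (d + 1) accN accF
    else (accN, accF)

-- the e > T part of Source B's loop body (always sets T := end)
def bMain (n : List Int) (ner : String) (s e : Int) (p : Nat)
    (accN : List String) (accF : List Int) : Option Int × List String × List Int :=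
  let q := rankLt n e
  let k := bRun n q s p (q + 1) 0
  if 0 < k ∧ s + (k : Int) = e then (some e, accN, accF)          -- whole chunk deleted
  else if p + k < q then                                          -- scattered deletions
    let r := bScan n ner q (q + 1) (p + k) accN accF
    if q = n.length ∧ n.getD (n.length - 1) 0 < e - 1 then
      (some e, ner :: r.1, (e - (n.length : Int)) :: r.2)
    else (some e, r.1, r.2)
  else (some e, ner :: accN, (e - (q : Int)) :: accF)             -- no deletions ahead of end

def stepB (n : List Int) (st : Option Int × List String × List Int) (c : String × Int × Int) :
    Option Int × List String × List Int :=
  let T := st.1; let accN := st.2.1; let accF := st.2.2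
  let ner := c.1; let s := c.2.1; let e := c.2.2
  match T with
  | some t =>
      if e ≤ t then (T, ner :: accN, (e - (rankLt n t : Int)) :: accF)
      else bMain n ner s e (rankLt n t) accN accF
  | none => bMain n ner s e 0 accN accF

def delete_o_alt (old_ner : List String) (old_fence : List Int) (n_indices : List Int) :
    List String × List Int :=
  let st := (old_ner.zip (old_fence.zip old_fence.tail)).foldl (stepB n_indices) (none, [], [0])
  (st.2.1.reverse, st.2.2.reverse)

-- ===== PRECONDITION & SPEC =====
-- Pre_ excludes exactly the inputs on which A's assert raises AssertionError:
-- n_indices must be strictly increasing (Pairwise (<) ≡ Python's adjacent-pairs check by transitivity).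
def Pre_delete_o (old_ner : List String) (old_fence : List Int) (n_indices : List Int) : Prop :=
  List.Pairwise (· < ·) n_indices
instance (old_ner : List String) (old_fence : List Int) (n_indices : List Int) :
    Decidable (Pre_delete_o old_ner old_fence n_indices) := by unfold Pre_delete_o; infer_instance

def pvWitness_delete_o : List String × List Int × List Int := (["PER", "LOC"], [0, 3, 5], [1, 3])

def Spec_delete_o (old_ner : List String) (old_fence : List Int) (n_indices : List Int)
    (out : List String × List Int) : Prop := out = delete_o_alt old_ner old_fence n_indices
instance (old_ner : List String) (old_fence : List Int) (n_indices : List Int)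
    (out : List String × List Int) : Decidable (Spec_delete_o old_ner old_fence n_indices out) := by
  unfold Spec_delete_o; infer_instance

-- ===== CLAIM (what is proved, stated in full; the proofs are below) =====
def Claim_equal_delete_o : Prop := ∀ (old_ner : List String) (old_fence : List Int) (n_indices : List Int), Dom_delete_o old_ner old_fence n_indices → Pre_delete_o old_ner old_fence n_indices → Spec_delete_o old_ner old_fence n_indices (delete_o old_ner old_fence n_indices)

-- ===== LEMMAS AND PROOFS =====
theorem rankLt_le (n : List Int) (e : Int) : rankLt n e ≤ n.length :=
  List.countP_le_length

theorem lt_rank_iff (n : List Int) (hs : n.Pairwise (· < ·)) (e : Int) (i : Nat) :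
    i < rankLt n e ↔ ∃ h : i < n.length, n[i] < e := by
  induction n generalizing i with
  | nil => simp [rankLt]
  | cons a l ih =>
    rcases List.pairwise_cons.mp hs with ⟨ha, hl⟩
    have IH := fun j => ih hl j
    simp only [rankLt] at IH ⊢
    by_cases hae : a < e
    · have hc : List.countP (fun x => decide (x < e)) (a :: l) =
          List.countP (fun x => decide (x < e)) l + 1 := by
        rw [List.countP_cons]; simp [hae]
      rw [hc]
      cases i with
      | zero =>
        simp only [List.length_cons, List.getElem_cons_zero]
        exact ⟨fun _ => ⟨by omega, hae⟩, fun _ => by omega⟩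
      | succ j =>
        simp only [List.length_cons, List.getElem_cons_succ]
        constructor
        · intro h
          rcases (IH j).mp (by omega) with ⟨hj, hv⟩
          exact ⟨by omega, hv⟩
        · rintro ⟨hj, hv⟩
          have := (IH j).mpr ⟨by omega, hv⟩
          omega
    · have hz : List.countP (fun x => decide (x < e)) l = 0 := by
        rw [List.countP_eq_zero]
        intro x hx
        have := ha x hx
        simp only [decide_eq_true_eq]
        omega
      have hc : List.countP (fun x => decide (x < e)) (a :: l) = 0 := by
        rw [List.countP_cons]; simp [hae, hz]
      rw [hc]
      cases i with
      | zero =>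
        simp only [List.length_cons, List.getElem_cons_zero]
        exact ⟨fun h => by omega, fun ⟨_, hv⟩ => by omega⟩
      | succ j =>
        simp only [List.length_cons, List.getElem_cons_succ]
        constructor
        · intro h; omega
        · rintro ⟨hj, hv⟩
          have hax : a < l[j] := ha _ (List.getElem_mem _)
          omega

theorem sorted_get_lt (n : List Int) (hs : n.Pairwise (· < ·)) {i j : Nat}
    (hij : i < j) (hj : j < n.length) : n[i]'(by omega) < n[j] :=
  (List.pairwise_iff_getElem.mp hs) i j (by omega) hj hij

theorem rank_mono (n : List Int) {t e : Int} (h : t ≤ e) : rankLt n t ≤ rankLt n e := by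
  apply List.countP_mono_left
  intro x _ hx
  simp only [decide_eq_true_eq] at hx ⊢
  omega
theorem getD_eq_getElem (n : List Int) (i : Nat) (h : i < n.length) :
    n.getD i 0 = n[i] := by
  simp [List.getD_eq_getElem?_getD, List.getElem?_eq_getElem h]

-- A's first while makes no step when its condition fails (any fuel)
theorem aFirst_stop (n : List Int) (s e : Int) (f deletion : Nat) (offset : Int)
    (deleted : Option Int)
    (h : ∀ (hl : deletion < n.length), ¬ (n[deletion] = s + offset ∧ n[deletion] < e)) :
    aFirst n s e f deletion offset deleted = (deletion, deleted) := by
  cases f with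
  | zero => rfl
  | succ f =>
    rw [aFirst]
    split
    · next hl => rw [if_neg (h hl)]
    · rfl

-- Source B's run-length while makes no step when its condition fails (any fuel)
theorem bRun_stop (n : List Int) (q : Nat) (s : Int) (p f k : Nat)
    (h : ¬ (p + k < q ∧ n.getD (p + k) 0 = s + (k : Int))) :
    bRun n q s p f k = k := by
  cases f with
  | zero => rfl
  | succ f => rw [bRun, if_neg h]

-- the first-while of A runs in lockstep with Source B's run-length while
theorem aFirst_eq (n : List Int) (hs : n.Pairwise (· < ·)) (s e : Int) (p : Nat) :
    ∀ (m k fa fb : Nat), rankLt n e - k ≤ m → rankLt n e - k < fa → rankLt n e - k < fb →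
      aFirst n s e fa (p + k) (k : Int)
          (if k = 0 then none else some (s + (k : Int) - 1)) =
        (p + bRun n (rankLt n e) s p fb k,
         if bRun n (rankLt n e) s p fb k = 0 then none
         else some (s + (bRun n (rankLt n e) s p fb k : Int) - 1)) := by
  have hstop : ∀ k fa fb, ¬ (p + k < rankLt n e ∧ n.getD (p + k) 0 = s + (k : Int)) →
      aFirst n s e fa (p + k) (k : Int)
          (if k = 0 then none else some (s + (k : Int) - 1)) =
        (p + bRun n (rankLt n e) s p fb k,
         if bRun n (rankLt n e) s p fb k = 0 then none
         else some (s + (bRun n (rankLt n e) s p fb k : Int) - 1)) := by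
    intro k fa fb hcond
    rw [bRun_stop n _ s p fb k hcond]
    rw [aFirst_stop n s e fa (p + k) (k : Int) _ ?_]
    intro hl ⟨h1, h2⟩
    have hq : p + k < rankLt n e := (lt_rank_iff n hs e (p + k)).mpr ⟨hl, h2⟩
    exact hcond ⟨hq, by rw [getD_eq_getElem n _ hl]; exact h1⟩
  intro m
  induction m with
  | zero =>
    intro k fa fb hk _ _
    exact hstop k fa fb (by rintro ⟨h1, _⟩; omega)
  | succ m ih =>
    intro k fa fb hk hfa hfb
    by_cases hcond : p + k < rankLt n e ∧ n.getD (p + k) 0 = s + (k : Int)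
    · obtain ⟨h1, h2⟩ := hcond
      have hq := rankLt_le n e
      have hlen : p + k < n.length := by omega
      have hlt : n[p + k] < e := by
        rcases (lt_rank_iff n hs e (p + k)).mp h1 with ⟨_, hv⟩; exact hv
      have hval : n[p + k] = s + (k : Int) := by rw [← getD_eq_getElem n _ hlen]; exact h2
      have hcnd : p + k < rankLt n e ∧ n.getD (p + k) 0 = s + (k : Int) := ⟨h1, h2⟩
      have hcnd2 : n[p + k] = s + (k : Int) ∧ n[p + k] < e := ⟨hval, hlt⟩
      obtain ⟨fa', rfl⟩ : ∃ f, fa = f + 1 := ⟨fa - 1, by omega⟩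
      obtain ⟨fb', rfl⟩ : ∃ f, fb = f + 1 := ⟨fb - 1, by omega⟩
      rw [aFirst, dif_pos hlen]
      simp only [if_pos hcnd2]
      conv_rhs => rw [bRun, if_pos hcnd]
      have heq : aFirst n s e fa' (p + k + 1) ((k : Int) + 1) (some n[p + k]) =
          aFirst n s e fa' (p + (k + 1)) (((k + 1 : Nat)) : Int)
            (if k + 1 = 0 then none else some (s + ((k + 1 : Nat) : Int) - 1)) := by
        have e1 : p + k + 1 = p + (k + 1) := by omega
        have e2 : (k : Int) + 1 = ((k + 1 : Nat) : Int) := by push_cast; ring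
        have e3 : some n[p + k] =
            (if k + 1 = 0 then none else some (s + ((k + 1 : Nat) : Int) - 1)) := by
          rw [if_neg (Nat.succ_ne_zero k), hval]
          push_cast; congr 1; ring
        rw [e1, e2, e3]
      rw [heq, ih (k + 1) fa' fb' (by omega) (by omega) (by omega)]
    · exact hstop k fa fb hcond
-- what the run-length loop guarantees about a nonzero result
theorem bRun_last (n : List Int) (q : Nat) (s : Int) (p : Nat) :
    ∀ (m k fb : Nat), q - k ≤ m →
      bRun n q s p fb k = k ∨
        (p + bRun n q s p fb k - 1 < q ∧ k < bRun n q s p fb k ∧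
         n.getD (p + bRun n q s p fb k - 1) 0 = s + (bRun n q s p fb k : Int) - 1) := by
  intro m
  induction m with
  | zero =>
    intro k fb hk
    have : ¬ (p + k < q ∧ n.getD (p + k) 0 = s + (k : Int)) := by rintro ⟨h1, _⟩; omega
    rw [bRun_stop n q s p fb k this]; exact Or.inl rfl
  | succ m ih =>
    intro k fb hk
    cases fb with
    | zero => exact Or.inl rfl
    | succ fb =>
      by_cases hcond : p + k < q ∧ n.getD (p + k) 0 = s + (k : Int)
      · rw [bRun, if_pos hcond]
        rcases ih (k + 1) fb (by omega) with h | ⟨h1, h2, h3⟩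
        · rw [h]
          refine Or.inr ⟨by omega, by omega, ?_⟩
          have he : p + (k + 1) - 1 = p + k := by omega
          rw [he, hcond.2]; push_cast; ring
        · exact Or.inr ⟨h1, by omega, h3⟩
      · rw [bRun, if_neg hcond]; exact Or.inl rfl

-- bScan stops at the right edge (any fuel)
theorem bScan_stop (n : List Int) (ner : String) (q f d : Nat) (accN : List String)
    (accF : List Int) (h : ¬ d < q) : bScan n ner q f d accN accF = (accN, accF) := by
  cases f with
  | zero => rfl
  | succ f => rw [bScan, if_neg h]

-- one step of bScan
theorem bScan_step (n : List Int) (ner : String) (q f d : Nat) (accN : List String)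
    (accF : List Int) (h : d < q) :
    bScan n ner q (f + 1) d accN accF =
      if accF.headD 0 < n.getD d 0 - (d : Int) then
        bScan n ner q f (d + 1) (ner :: accN) ((n.getD d 0 - (d : Int)) :: accF)
      else bScan n ner q f (d + 1) accN accF := by
  rw [bScan, if_pos h]

-- A's rhs while makes no step when the pointed value has reached e (any fuel)
theorem aRhs_stop (n : List Int) (e : Int) (ner : String) (f deletion : Nat)
    (next_ptr : Int) (accN : List String) (accF : List Int) (h : ¬ next_ptr < e) :
    aRhs n e ner f deletion next_ptr accN accF = (deletion, next_ptr, accN, accF) := by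
  cases f with
  | zero => rfl
  | succ f => rw [aRhs, if_neg h]

-- the rhs while of A runs in lockstep with Source B's range-scan
theorem aRhs_eq (n : List Int) (hs : n.Pairwise (· < ·)) (e : Int) (ner : String) :
    ∀ (m d fa fs : Nat) (accN : List String) (accF : List Int),
      rankLt n e - d ≤ m → rankLt n e - d < fa → rankLt n e - d < fs →
      d < rankLt n e →
      aRhs n e ner fa d (n.getD d 0) accN accF =
        (rankLt n e,
         (if rankLt n e = n.length then n.getD (rankLt n e - 1) 0
          else n.getD (rankLt n e) 0),
         (bScan n ner (rankLt n e) fs d accN accF).1,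
         (bScan n ner (rankLt n e) fs d accN accF).2) := by
  intro m
  induction m with
  | zero => intro d fa fs accN accF hm _ _ hd; omega
  | succ m ih =>
    intro d fa fs accN accF hm hfa hfs hd
    have hq := rankLt_le n e
    have hdl : d < n.length := by omega
    have hlt : n[d] < e := by rcases (lt_rank_iff n hs e d).mp hd with ⟨_, hv⟩; exact hv
    have hget : n.getD d 0 = n[d] := getD_eq_getElem n d hdl
    obtain ⟨fa', rfl⟩ : ∃ f, fa = f + 1 := ⟨fa - 1, by omega⟩
    obtain ⟨fs', rfl⟩ : ∃ f, fs = f + 1 := ⟨fs - 1, by omega⟩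
    rw [aRhs, if_pos (by rw [hget]; exact hlt)]
    rw [bScan_step n ner _ fs' d accN accF hd]
    simp only [hget]
    have key : ∀ (accN' : List String) (accF' : List Int),
        (if h : d + 1 < n.length then aRhs n e ner fa' (d + 1) n[d + 1] accN' accF'
         else (d + 1, n[d], accN', accF')) =
          (rankLt n e,
           (if rankLt n e = n.length then n.getD (rankLt n e - 1) 0
            else n.getD (rankLt n e) 0),
           (bScan n ner (rankLt n e) fs' (d + 1) accN' accF').1,
           (bScan n ner (rankLt n e) fs' (d + 1) accN' accF').2) := by
      intro accN' accF'
      rcases Nat.lt_or_ge (d + 1) (rankLt n e) with hnext | hnext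
      · have hnl : d + 1 < n.length := by omega
        rw [dif_pos hnl, ← getD_eq_getElem n (d + 1) hnl,
          ih (d + 1) fa' fs' _ _ (by omega) (by omega) (by omega) hnext]
      · have hde : d + 1 = rankLt n e := by omega
        rw [bScan_stop n ner _ fs' (d + 1) accN' accF' (by omega)]
        by_cases hnl : d + 1 < n.length
        · rw [dif_pos hnl]
          have hge : ¬ n[d + 1] < e := by
            intro hc
            have : d + 1 < rankLt n e := (lt_rank_iff n hs e (d + 1)).mpr ⟨hnl, hc⟩
            omega
          rw [aRhs_stop n e ner fa' (d + 1) _ accN' accF' hge]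
          have hqne : ¬ rankLt n e = n.length := by omega
          rw [if_neg hqne, ← hde, getD_eq_getElem n (d + 1) hnl]
        · rw [dif_neg hnl]
          have hqlen : rankLt n e = n.length := by omega
          have hd1 : rankLt n e - 1 = d := by omega
          rw [if_pos hqlen, hd1, hget, hde]
    by_cases hp : accF.headD 0 < n[d] - (d : Int)
    · simp only [if_pos hp]
      exact key _ _
    · simp only [if_neg hp]
      exact key _ _
def rankOf (n : List Int) : Option Int → Nat
  | none => 0
  | some t => rankLt n t

-- one chunk with e above the old threshold: A's body simulates bMain
theorem bMain_sim (n : List Int) (hs : n.Pairwise (· < ·)) (ner : String) (s e : Int)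
    (p : Nat) (accN : List String) (accF : List Int) (hp : p ≤ rankLt n e) :
    stepA n (p, accN, accF) (ner, s, e) =
      (rankOf n (bMain n ner s e p accN accF).1,
       (bMain n ner s e p accN accF).2.1, (bMain n ner s e p accN accF).2.2) := by
  have hq := rankLt_le n e
  have hA := aFirst_eq n hs s e p (rankLt n e) 0 (n.length + 1) (rankLt n e + 1)
    (by omega) (by omega) (by omega)
  have hA' : aFirst n s e (n.length + 1) p 0 none =
      (p + bRun n (rankLt n e) s p (rankLt n e + 1) 0,
       if bRun n (rankLt n e) s p (rankLt n e + 1) 0 = 0 then none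
       else some (s + (bRun n (rankLt n e) s p (rankLt n e + 1) 0 : Int) - 1)) := by
    simpa using hA
  have hlast := bRun_last n (rankLt n e) s p (rankLt n e) 0 (rankLt n e + 1) (by omega)
  set q := rankLt n e with hqdef
  set K := bRun n q s p (q + 1) 0 with hKdef
  clear_value K q
  have hpK : p + K ≤ q := by
    rcases hlast with h | ⟨h1, _, _⟩
    · omega
    · omega
  simp only [stepA, bMain, hA', ← hqdef, ← hKdef]
  by_cases hw : 0 < K ∧ s + (K : Int) = e
  · -- whole chunk deleted
    have hKne : K ≠ 0 := by omega
    have hdel : (if K = 0 then none else some (s + (K : Int) - 1)) = some (e - 1) := by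
      rw [if_neg hKne]; congr 1; omega
    rcases hlast with h | ⟨h1, h2, h3⟩
    · omega
    have hlen1 : p + K - 1 < n.length := by omega
    have hval1 : n[p + K - 1] = e - 1 := by
      rw [← getD_eq_getElem n _ hlen1, h3]; omega
    have hqK : q = p + K := by
      by_contra hne
      have hlt : p + K < q := by omega
      rcases (lt_rank_iff n hs e (p + K)).mp (hqdef ▸ hlt) with ⟨hl, hv⟩
      have := sorted_get_lt n hs (show p + K - 1 < p + K by omega) hl
      omega
    rw [if_pos hdel, if_pos hw]
    simp only [rankOf, ← hqdef, hqK]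
  · -- not whole
    have hdel : ¬ (if K = 0 then none else some (s + (K : Int) - 1)) = some (e - 1) := by
      by_cases hK0 : K = 0
      · rw [if_pos hK0]; simp
      · rw [if_neg hK0]
        intro hc
        have := Option.some.inj hc
        exact hw ⟨by omega, by omega⟩
    rw [if_neg hdel, if_neg hw]
    by_cases hrhs : p + K < q
    · rcases (lt_rank_iff n hs e (p + K)).mp (hqdef ▸ hrhs) with ⟨hl, hv⟩
      rw [dif_pos hl, if_pos hv, if_pos hrhs]
      rw [← getD_eq_getElem n _ hl]
      have hRhs := aRhs_eq n hs e ner q (p + K) (n.length + 1) (q + 1) accN accF (by omega) (by omega) (by omega) (hqdef ▸ hrhs)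
      rw [← hqdef] at hRhs
      rw [hRhs]
      by_cases hql : q = n.length
      · rw [if_pos hql]
        by_cases htr : n.getD (q - 1) 0 < e - 1
        · rw [if_pos htr, if_pos ⟨hql, by rw [← hql]; exact htr⟩]
          simp only [rankOf, ← hqdef, hql]
        · rw [if_neg htr, if_neg (by rintro ⟨_, hc⟩; rw [hql] at htr; exact htr hc)]
          simp only [rankOf, ← hqdef]
      · rw [if_neg hql]
        have hqlen : q < n.length := by omega
        have hge : ¬ n[q] < e := by
          intro hc
          have h2 : q < rankLt n e := (lt_rank_iff n hs e q).mpr ⟨hqlen, hc⟩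
          omega
        have hgd : n.getD q 0 = n[q] := getD_eq_getElem n q hqlen
        have htr : ¬ n.getD q 0 < e - 1 := by rw [hgd]; omega
        rw [if_neg htr, if_neg (by rintro ⟨hc, _⟩; exact hql hc)]
        simp only [rankOf, ← hqdef]
    · have hKq : p + K = q := by omega
      have hbranch : ∀ (h : p + K < n.length), ¬ n[p + K] < e := by
        intro h hc
        exact hrhs (hqdef.symm ▸ (lt_rank_iff n hs e (p + K)).mpr ⟨h, hc⟩)
      have hgoal : (if h : p + K < n.length then
            if n[p + K] < e then
              (let r2 := aRhs n e ner (n.length + 1) (p + K) n[p + K] accN accF;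
               if r2.2.1 < e - 1 then (r2.1, ner :: r2.2.2.1, (e - (r2.1 : Int)) :: r2.2.2.2)
               else (r2.1, r2.2.2.1, r2.2.2.2))
            else (p + K, ner :: accN, (e - ((p + K : Nat) : Int)) :: accF)
          else (p + K, ner :: accN, (e - ((p + K : Nat) : Int)) :: accF)) =
          (p + K, ner :: accN, (e - ((p + K : Nat) : Int)) :: accF) := by
        by_cases h : p + K < n.length
        · rw [dif_pos h, if_neg (hbranch h)]
        · rw [dif_neg h]
      rw [if_neg hrhs, hgoal]
      simp only [rankOf, ← hqdef, ← hKq]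

-- one chunk of A simulates one chunk of B
theorem step_sim (n : List Int) (hs : n.Pairwise (· < ·)) (T : Option Int)
    (accN : List String) (accF : List Int) (c : String × Int × Int) :
    stepA n (rankOf n T, accN, accF) c =
      (rankOf n (stepB n (T, accN, accF) c).1,
       (stepB n (T, accN, accF) c).2.1, (stepB n (T, accN, accF) c).2.2) := by
  obtain ⟨ner, s, e⟩ := c
  match T with
  | none =>
      simp only [stepB, rankOf]
      exact bMain_sim n hs ner s e 0 accN accF (by omega)
  | some t =>
      by_cases he : e ≤ t
      · simp only [stepB, rankOf, if_pos he]
        have hstop : aFirst n s e (n.length + 1) (rankLt n t) 0 none =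
            (rankLt n t, none) := by
          apply aFirst_stop
          rintro hl ⟨_, hc⟩
          have h2 : rankLt n t < rankLt n t :=
            (lt_rank_iff n hs t (rankLt n t)).mpr ⟨hl, by omega⟩
          omega
        simp only [stepA, hstop]
        have hne : ¬ (none : Option Int) = some (e - 1) := by simp
        rw [if_neg hne]
        have hbranch : ∀ (h : rankLt n t < n.length), ¬ n[rankLt n t] < e := by
          intro h hc
          have : rankLt n t < rankLt n t :=
            (lt_rank_iff n hs t (rankLt n t)).mpr ⟨h, by omega⟩
          omega
        by_cases h : rankLt n t < n.length
        · rw [dif_pos h, if_neg (hbranch h)]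
        · rw [dif_neg h]
      · simp only [stepB, rankOf, if_neg he]
        exact bMain_sim n hs ner s e (rankLt n t) accN accF (rank_mono n (by omega))
theorem fold_sim (n : List Int) (hs : n.Pairwise (· < ·)) :
    ∀ (cs : List (String × Int × Int)) (T : Option Int) (accN : List String) (accF : List Int),
      cs.foldl (stepA n) (rankOf n T, accN, accF) =
        (rankOf n ((cs.foldl (stepB n) (T, accN, accF)).1),
         (cs.foldl (stepB n) (T, accN, accF)).2.1,
         (cs.foldl (stepB n) (T, accN, accF)).2.2) := by
  intro cs
  induction cs with
  | nil => intro T accN accF; rfl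
  | cons c cs ih =>
    intro T accN accF
    rw [List.foldl_cons, List.foldl_cons, step_sim n hs T accN accF c]
    have h : stepB n (T, accN, accF) c =
        ((stepB n (T, accN, accF) c).1, (stepB n (T, accN, accF) c).2.1,
         (stepB n (T, accN, accF) c).2.2) := rfl
    rw [ih ((stepB n (T, accN, accF) c).1) _ _, ← h]

-- ===== VERDICT (by name: the statement is the Claim_ definition above) =====
theorem delete_o_spec : Claim_equal_delete_o := by
  intro old_ner old_fence n_indices _ hpre
  unfold Spec_delete_o delete_o delete_o_alt
  have h := fold_sim n_indices hpre (old_ner.zip (old_fence.zip old_fence.tail)) none [] [0]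
  simp only [rankOf] at h
  rw [h]
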